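-- pv_equiv track=rewrite | github.com/QuipNetwork/quip-protocol | tutte/matroids/parallel_connection.py | _edge_set_nullity
-- ===== SOURCE A (Python) =====
-- def _edge_set_nullity(edges: tuple) -> int:
--     """Compute nullity n(S) = |S| - r(S) of an edge set in its graphic matroid.
--
--     r(S) = number of edges in a spanning forest of the subgraph formed by S,
--     computed via union-find.
--     """
--     if not edges:
--         return 0
--
--     parent = {}
--
--     def find(x):
--         while parent.get(x, x) != x:
--             parent[x] = parent.get(parent[x], parent[x])
--             x = parent[x]
--         return x
--
--     def union(x, y):
--         rx, ry = find(x), find(y)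
--         if rx == ry:
--             return False
--         parent[rx] = ry
--         return True
--
--     rank = 0
--     for u, v in edges:
--         parent.setdefault(u, u)
--         parent.setdefault(v, v)
--         if union(u, v):
--             rank += 1
--
--     return len(edges) - rank
-- ===== SOURCE B (Python) =====
-- def _find_comp(comps, x):
--     for c in comps:
--         if x in c:
--             return c
--     return None
--
--
-- def _edge_set_nullity(edges: tuple) -> int:
--     """Nullity = number of edges that close a cycle, counted while merging
--     whole component lists (quick-find over component lists, no parent pointers)."""
--     comps = []
--     nullity = 0
--     for u, v in edges:
--         cu = _find_comp(comps, u)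
--         cv = _find_comp(comps, v)
--         if cu is None and cv is None:
--             if u == v:
--                 comps = comps + [[u]]
--                 nullity += 1
--             else:
--                 comps = comps + [[u, v]]
--         elif cu is None:
--             comps = [c for c in comps if c != cv] + [cv + [u]]
--         elif cv is None:
--             comps = [c for c in comps if c != cu] + [cu + [v]]
--         elif cu == cv:
--             nullity += 1
--         else:
--             comps = [c for c in comps if c != cu and c != cv] + [cu + cv]
--     return nullity
-- ===== Notes on version B (the rewrite author's own statement) =====
-- stated objective: alternative
-- what changed: Replaces A's pointer-based union-find (parent dict with path-compressing find and union, returning len(edges) - rank) by a quick-find that keeps the partition as explicit component lists, merges whole lists per edge, and counts the redundant (cycle-closing) edges directly.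
import Mathlib
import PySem

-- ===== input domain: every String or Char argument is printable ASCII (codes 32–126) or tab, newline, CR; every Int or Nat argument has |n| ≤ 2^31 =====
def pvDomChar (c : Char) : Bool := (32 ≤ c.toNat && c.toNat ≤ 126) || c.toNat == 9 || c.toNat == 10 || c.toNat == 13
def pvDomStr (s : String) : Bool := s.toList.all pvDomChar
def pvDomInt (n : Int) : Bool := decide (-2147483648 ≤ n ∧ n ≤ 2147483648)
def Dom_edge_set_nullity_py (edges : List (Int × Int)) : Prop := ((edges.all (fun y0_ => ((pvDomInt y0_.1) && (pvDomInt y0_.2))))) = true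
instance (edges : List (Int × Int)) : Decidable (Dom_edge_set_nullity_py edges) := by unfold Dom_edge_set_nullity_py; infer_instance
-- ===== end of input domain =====

-- B replaces A's pointer-based union-find (path-compressed parent dict) by a quick-find that
-- merges whole component lists and counts the redundant edges directly; objective: alternative.

-- ===== PORT A =====
-- while parent.get(x, x) != x: parent[x] = parent.get(parent[x], parent[x]); x = parent[x]
-- (fuel = parent.size + 1 is a totality guard only; the proof shows it is never exhausted)
def pvFind (fuel : Nat) (p : PySem.Dict Int Int) (x : Int) : PySem.Dict Int Int × Int :=
  match fuel with
  | 0 => (p, x)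
  | Nat.succ fuel =>
    if p.getD x x ≠ x then
      let px := p.getD x x
      let g := p.getD px px
      pvFind fuel (p.insert x g) g
    else (p, x)

def pvUnion (p : PySem.Dict Int Int) (x y : Int) : PySem.Dict Int Int × Bool :=
  let fx := pvFind (p.size + 1) p x
  let fy := pvFind (fx.1.size + 1) fx.1 y
  if fx.2 = fy.2 then (fy.1, false)
  else (fy.1.insert fx.2 fy.2, true)

def pvStepA (st : PySem.Dict Int Int × Int) (uv : Int × Int) : PySem.Dict Int Int × Int :=
  let p := st.1.setdefault uv.1 uv.1
  let p := p.setdefault uv.2 uv.2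
  let r := pvUnion p uv.1 uv.2
  (r.1, if r.2 then st.2 + 1 else st.2)

def edge_set_nullity_py (edges : List (Int × Int)) : Int :=
  if edges = [] then 0
  else (edges.length : Int) - (edges.foldl pvStepA (PySem.Dict.empty, 0)).2

-- ===== PORT B =====
def pvFindComp (comps : List (List Int)) (x : Int) : Option (List Int) :=
  match comps with
  | [] => none
  | c :: rest => if x ∈ c then some c else pvFindComp rest x

def pvStepB (st : List (List Int) × Int) (uv : Int × Int) : List (List Int) × Int :=
  match pvFindComp st.1 uv.1, pvFindComp st.1 uv.2 with
  | none, none =>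
      if uv.1 = uv.2 then (st.1 ++ [[uv.1]], st.2 + 1) else (st.1 ++ [[uv.1, uv.2]], st.2)
  | none, some cv => (st.1.filter (fun c => c ≠ cv) ++ [cv ++ [uv.1]], st.2)
  | some cu, none => (st.1.filter (fun c => c ≠ cu) ++ [cu ++ [uv.2]], st.2)
  | some cu, some cv =>
      if cu = cv then (st.1, st.2 + 1)
      else (st.1.filter (fun c => c ≠ cu ∧ c ≠ cv) ++ [cu ++ cv], st.2)

def edge_set_nullity_py_alt (edges : List (Int × Int)) : Int :=
  (edges.foldl pvStepB ([], 0)).2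

-- ===== PRECONDITION & SPEC =====
def Spec_edge_set_nullity_py (edges : List (Int × Int)) (out : Int) : Prop := out = edge_set_nullity_py_alt edges
instance (edges : List (Int × Int)) (out : Int) : Decidable (Spec_edge_set_nullity_py edges out) := by unfold Spec_edge_set_nullity_py; infer_instance

-- ===== CLAIM (what is proved, stated in full; the proofs are below) =====
def Claim_equal_edge_set_nullity_py : Prop := ∀ (edges : List (Int × Int)), Dom_edge_set_nullity_py edges → Spec_edge_set_nullity_py edges (edge_set_nullity_py edges)

-- ===== LEMMAS AND PROOFS =====

-- The coupling invariant: the union-find dict p represents exactly the partition comps.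
structure UFInv (p : PySem.Dict Int Int) (m : Int → Nat) (comps : List (List Int)) : Prop where
  flat_nodup : comps.flatten.Nodup
  nonempty : ∀ c ∈ comps, c ≠ []
  keys_iff : ∀ x : Int, p.contains x = true ↔ x ∈ comps.flatten
  closed : ∀ c ∈ comps, ∀ x ∈ c, p.getD x x ∈ c
  measure : ∀ x ∈ comps.flatten, p.getD x x = x ∨ m (p.getD x x) < m x
  root_uniq : ∀ c ∈ comps, ∃ r ∈ c, p.getD r r = r ∧ ∀ r' ∈ c, p.getD r' r' = r' → r' = r
  keys_nodup : p.keys.Nodup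

theorem pv_mem_flatten {x : Int} {c : List Int} {comps : List (List Int)}
    (hc : c ∈ comps) (hx : x ∈ c) : x ∈ comps.flatten :=
  List.mem_flatten.mpr ⟨c, hc, hx⟩

theorem pv_comp_unique {comps : List (List Int)} (hnd : comps.flatten.Nodup)
    {c c' : List Int} {x : Int} (hc : c ∈ comps) (hc' : c' ∈ comps)
    (hx : x ∈ c) (hx' : x ∈ c') : c = c' := by
  induction comps with
  | nil => cases hc
  | cons a rest ih =>
    rw [List.flatten_cons, List.nodup_append] at hnd
    obtain ⟨ha, hrest, hdisj⟩ := hnd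
    rcases List.mem_cons.mp hc with h1 | h1
    · rcases List.mem_cons.mp hc' with h2 | h2
      · rw [h1, h2]
      · exact absurd rfl (hdisj x (h1 ▸ hx) _ (pv_mem_flatten h2 hx'))
    · rcases List.mem_cons.mp hc' with h2 | h2
      · exact absurd rfl (hdisj x (h2 ▸ hx') _ (pv_mem_flatten h1 hx))
      · exact ih hrest h1 h2

theorem pv_comps_nodup {comps : List (List Int)} (hnd : comps.flatten.Nodup)
    (hne : ∀ c ∈ comps, c ≠ []) : comps.Nodup := by
  induction comps with
  | nil => exact List.nodup_nil
  | cons a rest ih =>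
    rw [List.flatten_cons, List.nodup_append] at hnd
    obtain ⟨ha, hrest, hdisj⟩ := hnd
    refine List.nodup_cons.mpr ⟨fun hmem => ?_, ih hrest (fun c hc => hne c (List.mem_cons_of_mem _ hc))⟩
    rcases List.exists_mem_of_ne_nil a (hne a (List.mem_cons_self)) with ⟨x, hx⟩
    exact absurd rfl (hdisj x hx _ (pv_mem_flatten hmem hx))

theorem pv_perm_filter_one {α : Type} [DecidableEq α] {l : List α} (hnd : l.Nodup) {a : α}
    (ha : a ∈ l) : l.Perm (a :: l.filter (fun c => c ≠ a)) := by
  induction l with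
  | nil => cases ha
  | cons b rest ih =>
    obtain ⟨hb, hrest⟩ := List.nodup_cons.mp hnd
    rcases List.mem_cons.mp ha with h1 | h1
    · have he : rest.filter (fun c => c ≠ a) = rest := by
        apply List.filter_eq_self.mpr
        intro c hc
        simp only [decide_eq_true_eq]
        exact fun h => hb ((h1.symm.trans h.symm) ▸ hc)
      have : (b :: rest).filter (fun c => c ≠ a) = rest := by
        rw [List.filter_cons, if_neg (by simp [h1])]
        exact he
      rw [this, ← h1]
    · have hba : b ≠ a := fun h => hb (h ▸ h1)
      have hp := (ih hrest h1).cons b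
      refine hp.trans (.trans (List.Perm.swap _ _ _) ?_)
      have : (b :: rest).filter (fun c => c ≠ a) = b :: rest.filter (fun c => c ≠ a) := by
        rw [List.filter_cons, if_pos (by simp [hba])]
      rw [this]

theorem pv_perm_filter_two {α : Type} [DecidableEq α] {l : List α} (hnd : l.Nodup)
    {a b : α} (ha : a ∈ l) (hb : b ∈ l) (hab : a ≠ b) :
    l.Perm (a :: b :: l.filter (fun c => c ≠ a ∧ c ≠ b)) := by
  have h1 := pv_perm_filter_one hnd ha
  have hb' : b ∈ l.filter (fun c => c ≠ a) :=
    List.mem_filter.mpr ⟨hb, by simp [Ne.symm hab]⟩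
  have h2 := (pv_perm_filter_one (hnd.filter _) hb').cons a
  have he : (l.filter (fun c => c ≠ a)).filter (fun c => c ≠ b)
      = l.filter (fun c => c ≠ a ∧ c ≠ b) := by
    rw [List.filter_filter]
    apply List.filter_congr
    intro c _
    rw [Bool.eq_iff_iff]
    simp only [Bool.and_eq_true, decide_eq_true_eq]
    tauto
  refine (h1.trans h2).trans ?_
  rw [he]
theorem pv_length_filter_mono {α : Type} (l : List α) (p q : α → Bool)
    (h : ∀ x, q x = true → p x = true) : (l.filter q).length ≤ (l.filter p).length := by
  induction l with
  | nil => simp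
  | cons a t ih =>
    rw [List.filter_cons, List.filter_cons]
    by_cases hq : q a = true
    · rw [hq, h a hq]; simpa using ih
    · rw [Bool.not_eq_true] at hq
      rw [hq]
      by_cases hp : p a = true
      · rw [hp]; simp; omega
      · rw [Bool.not_eq_true] at hp; rw [hp]; simpa using ih

theorem pv_length_filter_lt {α : Type} {l : List α} {p q : α → Bool}
    (h : ∀ x, q x = true → p x = true) {g : α} (hg : g ∈ l) (hpg : p g = true)
    (hqg : q g = false) : (l.filter q).length < (l.filter p).length := by
  induction l with
  | nil => cases hg
  | cons a t ih =>
    rw [List.filter_cons, List.filter_cons]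
    rcases List.mem_cons.mp hg with h1 | h1
    · rw [h1] at hpg hqg
      rw [hpg, hqg]
      have := pv_length_filter_mono t p q h
      simp
      omega
    · have hlt := ih h1
      by_cases hq : q a = true
      · rw [hq, h a hq]; simpa using hlt
      · rw [Bool.not_eq_true] at hq
        rw [hq]
        by_cases hp : p a = true
        · rw [hp]; simp; omega
        · rw [Bool.not_eq_true] at hp; rw [hp]; simpa using hlt

theorem pvFindComp_eq_none {comps : List (List Int)} {x : Int} :
    pvFindComp comps x = none ↔ x ∉ comps.flatten := by
  induction comps with
  | nil => simp [pvFindComp]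
  | cons c rest ih =>
    by_cases hx : x ∈ c
    · simp [pvFindComp, hx]
    · simp [pvFindComp, hx, ih]

theorem pvFindComp_eq_some {comps : List (List Int)} {x : Int} {c : List Int}
    (h : pvFindComp comps x = some c) : c ∈ comps ∧ x ∈ c := by
  induction comps with
  | nil => simp [pvFindComp] at h
  | cons a rest ih =>
    by_cases hx : x ∈ a
    · rw [pvFindComp, if_pos hx, Option.some_inj] at h
      rw [← h]
      exact ⟨List.mem_cons_self, hx⟩
    · rw [pvFindComp, if_neg hx] at h
      obtain ⟨h1, h2⟩ := ih h
      exact ⟨List.mem_cons_of_mem _ h1, h2⟩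

theorem pvFind_spec (m : Int → Nat) (comps : List (List Int)) :
    ∀ (fuel : Nat) (p : PySem.Dict Int Int) (x : Int) (c : List Int),
    UFInv p m comps → c ∈ comps → x ∈ c →
    (comps.flatten.filter (fun y => decide (m y < m x))).length < fuel →
    ∃ p' r, pvFind fuel p x = (p', r) ∧ r ∈ c ∧ UFInv p' m comps ∧
      (∀ z, p'.getD z z = z ↔ p.getD z z = z) ∧ p'.keys = p.keys ∧ p.getD r r = r := by
  intro fuel
  induction fuel with
  | zero => intro p x c _ _ _ hlt; exact absurd hlt (Nat.not_lt_zero _)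
  | succ fuel ih =>
    intro p x c hInv hc hx hfuel
    by_cases hfix : p.getD x x = x
    · refine ⟨p, x, ?_, hx, hInv, fun z => Iff.rfl, rfl, hfix⟩
      simp [pvFind, hfix]
    · have hxflat : x ∈ comps.flatten := pv_mem_flatten hc hx
      have hpxc : p.getD x x ∈ c := hInv.closed c hc x hx
      have hgc : p.getD (p.getD x x) (p.getD x x) ∈ c := hInv.closed c hc _ hpxc
      have hpxflat : p.getD x x ∈ comps.flatten := pv_mem_flatten hc hpxc
      have hmpx : m (p.getD x x) < m x := by
        rcases hInv.measure x hxflat with h | h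
        · exact absurd h hfix
        · exact h
      have hmg : m (p.getD (p.getD x x) (p.getD x x)) < m x := by
        rcases hInv.measure _ hpxflat with h | h
        · rw [h]; exact hmpx
        · exact lt_trans h hmpx
      have hcont : p.contains x = true := by
        by_contra hcf
        rw [Bool.not_eq_true] at hcf
        exact hfix (PySem.Dict.getD_of_not_contains p x hcf)
      have hgne : p.getD (p.getD x x) (p.getD x x) ≠ x := by
        intro h
        rw [h] at hmg
        omega
      have hget1 : ∀ z : Int,
          (p.insert x (p.getD (p.getD x x) (p.getD x x))).getD z z
          = if z = x then p.getD (p.getD x x) (p.getD x x) else p.getD z z := by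
        intro z
        exact PySem.Dict.getD_insert p x z _ z
      have hkeys1 : (p.insert x (p.getD (p.getD x x) (p.getD x x))).keys = p.keys :=
        PySem.Dict.keys_insert_of_contains p _ hcont
      have hfix1 : ∀ z, (p.insert x (p.getD (p.getD x x) (p.getD x x))).getD z z = z ↔ p.getD z z = z := by
        intro z
        rw [hget1 z]
        by_cases hz : z = x
        · subst hz
          constructor
          · intro h; exact absurd (by simpa using h) hgne
          · intro h; exact absurd h hfix
        · rw [if_neg hz]
      have hInv1 : UFInv (p.insert x (p.getD (p.getD x x) (p.getD x x))) m comps := by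
        refine { flat_nodup := hInv.flat_nodup, nonempty := hInv.nonempty, keys_iff := ?_, closed := ?_, measure := ?_, root_uniq := ?_, keys_nodup := ?_ }
        · intro z
          rw [PySem.Dict.contains_iff_mem_keys, hkeys1, ← PySem.Dict.contains_iff_mem_keys]
          exact hInv.keys_iff z
        · intro c' hc' z hz
          rw [hget1 z]
          by_cases hzx : z = x
          · subst hzx
            have : c' = c := pv_comp_unique hInv.flat_nodup hc' hc hz hx
            rw [if_pos rfl, this]
            exact hgc
          · rw [if_neg hzx]
            exact hInv.closed c' hc' z hz
        · intro z hzf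
          rw [hget1 z]
          by_cases hzx : z = x
          · subst hzx
            rw [if_pos rfl]
            exact Or.inr hmg
          · rw [if_neg hzx]
            exact hInv.measure z hzf
        · intro c' hc'
          obtain ⟨r, hr, hrfix, huniq⟩ := hInv.root_uniq c' hc'
          exact ⟨r, hr, (hfix1 r).mpr hrfix, fun r' hr' hr'fix => huniq r' hr' ((hfix1 r').mp hr'fix)⟩
        · rw [hkeys1]; exact hInv.keys_nodup
      have hfuel1 : (comps.flatten.filter
          (fun y => decide (m y < m (p.getD (p.getD x x) (p.getD x x))))).length < fuel := by
        have hlt := pv_length_filter_lt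
          (p := fun y => decide (m y < m x))
          (q := fun y => decide (m y < m (p.getD (p.getD x x) (p.getD x x))))
          (fun y hy => by
            simp only [decide_eq_true_eq] at hy ⊢
            omega)
          (pv_mem_flatten hc hgc)
          (by simp only [decide_eq_true_eq]; exact hmg)
          (by simp)
        omega
      obtain ⟨p', r, heq, hrc, hInv', hfix', hkeys', hroot⟩ := ih _ _ c hInv1 hc hgc hfuel1
      refine ⟨p', r, ?_, hrc, hInv', fun z => (hfix' z).trans (hfix1 z), hkeys'.trans hkeys1, (hfix1 r).mp hroot⟩
      rw [pvFind]
      simp only [if_pos hfix]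
      exact heq
theorem pv_keys_length_eq_size (p : PySem.Dict Int Int) : p.keys.length = p.size := by
  simp [PySem.Dict.keys, PySem.Dict.size]

theorem pv_flatten_length {p : PySem.Dict Int Int} {m : Int → Nat} {comps : List (List Int)}
    (hInv : UFInv p m comps) : comps.flatten.length = p.size := by
  rw [← pv_keys_length_eq_size]
  apply List.Perm.length_eq
  rw [List.perm_ext_iff_of_nodup hInv.flat_nodup hInv.keys_nodup]
  intro z
  rw [← PySem.Dict.contains_iff_mem_keys]
  exact (hInv.keys_iff z).symm

theorem pv_fuel_ok {p : PySem.Dict Int Int} {m : Int → Nat} {comps : List (List Int)}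
    (hInv : UFInv p m comps) (x : Int) :
    (comps.flatten.filter (fun y => decide (m y < m x))).length < p.size + 1 := by
  have h1 : (comps.flatten.filter (fun y => decide (m y < m x))).length ≤ comps.flatten.length :=
    List.length_filter_le _ _
  have h2 := pv_flatten_length hInv
  omega

theorem pvUnion_same {m : Int → Nat} {comps : List (List Int)} {p : PySem.Dict Int Int}
    {u v : Int} {c : List Int} (hInv : UFInv p m comps) (hc : c ∈ comps)
    (hu : u ∈ c) (hv : v ∈ c) :
    ∃ p', pvUnion p u v = (p', false) ∧ UFInv p' m comps := by
  obtain ⟨p1, ru, heq1, hruc, hInv1, hfix1, hkeys1, hru⟩ :=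
    pvFind_spec m comps (p.size + 1) p u c hInv hc hu (pv_fuel_ok hInv u)
  obtain ⟨p2, rv, heq2, hrvc, hInv2, hfix2, hkeys2, hrv⟩ :=
    pvFind_spec m comps (p1.size + 1) p1 v c hInv1 hc hv (pv_fuel_ok hInv1 v)
  have hrufix1 : p1.getD ru ru = ru := (hfix1 ru).mpr hru
  obtain ⟨r0, hr0, hr0fix, huniq⟩ := hInv1.root_uniq c hc
  have hrr : ru = rv := by
    rw [huniq ru hruc hrufix1, huniq rv hrvc hrv]
  have : pvUnion p u v = (p2, false) := by
    simp only [pvUnion, heq1, heq2]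
    rw [if_pos hrr]
  exact ⟨p2, this, hInv2⟩

theorem pvUnion_diff {m : Int → Nat} {comps : List (List Int)} {p : PySem.Dict Int Int}
    {u v : Int} {cu cv w : List Int} (hInv : UFInv p m comps) (hcu : cu ∈ comps)
    (hu : u ∈ cu) (hcv : cv ∈ comps) (hv : v ∈ cv) (hne : cu ≠ cv)
    (hw : (cu ++ cv).Perm w) :
    ∃ p' m', pvUnion p u v = (p', true) ∧
      UFInv p' m' (comps.filter (fun c => c ≠ cu ∧ c ≠ cv) ++ [w]) := by
  obtain ⟨p1, ru, heq1, hruc, hInv1, hfix1, hkeys1, hru⟩ :=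
    pvFind_spec m comps (p.size + 1) p u cu hInv hcu hu (pv_fuel_ok hInv u)
  obtain ⟨p2, rv, heq2, hrvc, hInv2, hfix2, hkeys2, hrv⟩ :=
    pvFind_spec m comps (p1.size + 1) p1 v cv hInv1 hcv hv (pv_fuel_ok hInv1 v)
  -- both roots as fixpoints of p2
  have hrufix : p2.getD ru ru = ru := (hfix2 ru).mpr ((hfix1 ru).mpr hru)
  have hrvfix : p2.getD rv rv = rv := (hfix2 rv).mpr hrv
  have hrne : ru ≠ rv := by
    intro h
    exact hne (pv_comp_unique hInv.flat_nodup hcu hcv hruc (h ▸ hrvc))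
  have hequ : pvUnion p u v = (p2.insert ru rv, true) := by
    simp only [pvUnion, heq1, heq2]
    rw [if_neg hrne]
  -- the merged partition
  set comps' := comps.filter (fun c => c ≠ cu ∧ c ≠ cv) ++ [w] with hcomps'
  have hperm : comps.Perm (cu :: cv :: comps.filter (fun c => c ≠ cu ∧ c ≠ cv)) :=
    pv_perm_filter_two (pv_comps_nodup hInv.flat_nodup hInv.nonempty) hcu hcv hne
  have hflatperm : comps.flatten.Perm comps'.flatten := by
    refine (hperm.flatten).trans ?_
    rw [hcomps', List.flatten_append]
    simp only [List.flatten_cons, List.flatten_nil, List.append_nil]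
    have h0 : ((cu ++ cv) ++ (comps.filter (fun c => c ≠ cu ∧ c ≠ cv)).flatten).Perm
        ((comps.filter (fun c => c ≠ cu ∧ c ≠ cv)).flatten ++ w) :=
      List.perm_append_comm.trans (List.Perm.append_left _ hw)
    rw [List.append_assoc] at h0
    exact h0
  have hmem' : ∀ c', c' ∈ comps' ↔ (c' ∈ comps ∧ c' ≠ cu ∧ c' ≠ cv) ∨ c' = w := by
    intro c'
    rw [hcomps', List.mem_append, List.mem_filter]
    simp
  have hz_in_w : ∀ z : Int, z ∈ w ↔ z ∈ cu ∨ z ∈ cv := by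
    intro z
    rw [← hw.mem_iff, List.mem_append]
  have hrucontains : p2.contains ru = true := by
    rw [hInv2.keys_iff]
    exact pv_mem_flatten hcu hruc
  have hget3 : ∀ z : Int, (p2.insert ru rv).getD z z = if z = ru then rv else p2.getD z z :=
    fun z => PySem.Dict.getD_insert p2 ru z rv z
  have hkeys3 : (p2.insert ru rv).keys = p2.keys := PySem.Dict.keys_insert_of_contains p2 rv hrucontains
  have hru_only_cu : ∀ c' ∈ comps, ru ∈ c' → c' = cu :=
    fun c' hc' hruc' => pv_comp_unique hInv.flat_nodup hc' hcu hruc' hruc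
  refine ⟨p2.insert ru rv, fun z => if z = rv then 0 else m z + 1, hequ, ?_⟩
  refine { flat_nodup := hflatperm.nodup hInv2.flat_nodup,
           nonempty := ?_, keys_iff := ?_, closed := ?_, measure := ?_,
           root_uniq := ?_, keys_nodup := ?_ }
  · intro c' hc'
    rcases (hmem' c').mp hc' with ⟨h1, _, _⟩ | h1
    · exact hInv.nonempty c' h1
    · subst h1
      intro hnil
      have hlen := hw.length_eq
      rw [hnil, List.length_append] at hlen
      have hcunil : cu = [] := by
        cases cu with
        | nil => rfl
        | cons a t => simp at hlen
      exact hInv.nonempty cu hcu hcunil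
  · intro z
    rw [PySem.Dict.contains_iff_mem_keys, hkeys3, ← PySem.Dict.contains_iff_mem_keys,
      hInv2.keys_iff z, ← hflatperm.mem_iff]
  · intro c' hc' z hz
    rw [hget3 z]
    rcases (hmem' c').mp hc' with ⟨h1, h2, h3⟩ | h1
    · have hzru : z ≠ ru := by
        intro hzr
        subst hzr
        exact h2 (hru_only_cu c' h1 hz)
      rw [if_neg hzru]
      exact hInv2.closed c' h1 z hz
    · subst h1
      by_cases hzr : z = ru
      · rw [if_pos hzr]
        rw [hz_in_w]
        exact Or.inr hrvc
      · rw [if_neg hzr, hz_in_w]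
        rcases (hz_in_w z).mp hz with h | h
        · exact Or.inl (hInv2.closed cu hcu z h)
        · exact Or.inr (hInv2.closed cv hcv z h)
  · intro z hzf
    have hzflat : z ∈ comps.flatten := (hflatperm.mem_iff).mpr hzf
    rw [hget3 z]
    by_cases hzr : z = ru
    · subst hzr
      rw [if_pos rfl]
      refine Or.inr ?_
      rw [if_pos rfl, if_neg hrne]
      omega
    · rw [if_neg hzr]
      rcases hInv2.measure z hzflat with h | h
      · exact Or.inl h
      · refine Or.inr ?_
        by_cases hzv : z = rv
        · subst hzv
          rw [hrvfix] at h
          omega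
        · rw [if_neg hzv]
          by_cases hpv : p2.getD z z = rv
          · rw [if_pos hpv]
            omega
          · rw [if_neg hpv]
            omega
  · intro c' hc'
    rcases (hmem' c').mp hc' with ⟨h1, h2, h3⟩ | h1
    · obtain ⟨r, hr, hrfix, huniq⟩ := hInv2.root_uniq c' h1
      have hrne' : ∀ z ∈ c', z ≠ ru := by
        intro z hzc hzr
        subst hzr
        exact h2 (hru_only_cu c' h1 hzc)
      refine ⟨r, hr, ?_, ?_⟩
      · rw [hget3 r, if_neg (hrne' r hr)]
        exact hrfix
      · intro r' hr' hr'fix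
        rw [hget3 r', if_neg (hrne' r' hr')] at hr'fix
        exact huniq r' hr' hr'fix
    · subst h1
      obtain ⟨rU, hrU, hrUfix, huniqU⟩ := hInv2.root_uniq cu hcu
      obtain ⟨rV, hrV, hrVfix, huniqV⟩ := hInv2.root_uniq cv hcv
      have hruU : ru = rU := huniqU ru hruc hrufix
      have hrvV : rv = rV := huniqV rv hrvc hrvfix
      refine ⟨rv, (hz_in_w rv).mpr (Or.inr hrvc), ?_, ?_⟩
      · rw [hget3 rv, if_neg (Ne.symm hrne)]
        exact hrvfix
      · intro r' hr' hr'fix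
        rw [hget3 r'] at hr'fix
        by_cases hr'ru : r' = ru
        · rw [if_pos hr'ru] at hr'fix
          exact absurd hr'fix.symm (hr'ru ▸ hrne)
        · rw [if_neg hr'ru] at hr'fix
          rcases (hz_in_w r').mp hr' with h | h
          · exact absurd ((huniqU r' h hr'fix).trans hruU.symm) hr'ru
          · rw [hrvV]
            exact huniqV r' h hr'fix
  · rw [hkeys3]
    exact hInv2.keys_nodup
theorem pv_inv_add_new {p : PySem.Dict Int Int} {m : Int → Nat} {comps : List (List Int)}
    (hInv : UFInv p m comps) {x : Int} (hx : x ∉ comps.flatten) :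
    UFInv (p.insert x x) m (comps ++ [[x]]) := by
  have hflat : (comps ++ [[x]]).flatten = comps.flatten ++ [x] := by
    rw [List.flatten_append]
    simp
  have hcontx : p.contains x = false := by
    rw [← Bool.not_eq_true]
    intro h
    exact hx ((hInv.keys_iff x).mp h)
  have hget : ∀ z : Int, (p.insert x x).getD z z = if z = x then x else p.getD z z :=
    fun z => PySem.Dict.getD_insert p x z x z
  refine { flat_nodup := ?_, nonempty := ?_, keys_iff := ?_, closed := ?_,
           measure := ?_, root_uniq := ?_, keys_nodup := ?_ }
  · rw [hflat]
    apply List.Nodup.append hInv.flat_nodup (List.nodup_singleton x)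
    intro a ha hb
    rw [List.mem_singleton] at hb
    exact hx (hb ▸ ha)
  · intro c hc
    rcases List.mem_append.mp hc with h | h
    · exact hInv.nonempty c h
    · rw [List.mem_singleton] at h
      subst h
      simp
  · intro z
    rw [PySem.Dict.contains_insert, hflat, List.mem_append, List.mem_singleton]
    by_cases hz : z = x
    · subst hz
      simp
    · have hb : (z == x) = false := by simp [hz]
      rw [hb, Bool.false_or, hInv.keys_iff z]
      simp [hz]
  · intro c hc z hz
    rw [hget z]
    rcases List.mem_append.mp hc with h | h
    · have hzx : z ≠ x := fun he => hx (he ▸ pv_mem_flatten h hz)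
      rw [if_neg hzx]
      exact hInv.closed c h z hz
    · rw [List.mem_singleton] at h
      subst h
      rw [List.mem_singleton] at hz
      subst hz
      rw [if_pos rfl]
      simp
  · intro z hz
    rw [hget z]
    by_cases hzx : z = x
    · subst hzx
      rw [if_pos rfl]
      exact Or.inl rfl
    · rw [if_neg hzx]
      rw [hflat, List.mem_append, List.mem_singleton] at hz
      rcases hz with h | h
      · exact hInv.measure z h
      · exact absurd h hzx
  · intro c hc
    rcases List.mem_append.mp hc with h | h
    · obtain ⟨r, hr, hrfix, huniq⟩ := hInv.root_uniq c h
      have hne : ∀ z ∈ c, z ≠ x := fun z hzc he => hx (he ▸ pv_mem_flatten h hzc)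
      refine ⟨r, hr, ?_, ?_⟩
      · rw [hget r, if_neg (hne r hr)]
        exact hrfix
      · intro r' hr' hfx
        rw [hget r', if_neg (hne r' hr')] at hfx
        exact huniq r' hr' hfx
    · rw [List.mem_singleton] at h
      subst h
      refine ⟨x, List.mem_singleton.mpr rfl, ?_, ?_⟩
      · rw [hget x, if_pos rfl]
      · intro r' hr' _
        exact List.mem_singleton.mp hr'
  · rw [PySem.Dict.keys_insert_of_not_contains p x hcontx]
    apply List.Nodup.append hInv.keys_nodup (List.nodup_singleton x)
    intro a ha hb
    rw [List.mem_singleton] at hb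
    subst hb
    rw [← PySem.Dict.contains_iff_mem_keys] at ha
    rw [ha] at hcontx
    cases hcontx
theorem pv_step {p : PySem.Dict Int Int} {m : Int → Nat} {comps : List (List Int)}
    (hInv : UFInv p m comps) (uv : Int × Int) (rankN nullN : Int) :
    ∃ (p' : PySem.Dict Int Int) (comps' : List (List Int)) (d : Bool) (m' : Int → Nat),
      pvStepA (p, rankN) uv = (p', if d then rankN + 1 else rankN) ∧
      pvStepB (comps, nullN) uv = (comps', if d then nullN else nullN + 1) ∧
      UFInv p' m' comps' := by
  have hcontf : ∀ z : Int, z ∉ comps.flatten → p.contains z = false := by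
    intro z hz
    rw [← Bool.not_eq_true]
    intro h
    exact hz ((hInv.keys_iff z).mp h)
  have hcontt : ∀ z : Int, z ∈ comps.flatten → p.contains z = true :=
    fun z hz => (hInv.keys_iff z).mpr hz
  rcases hFu : pvFindComp comps uv.1 with _ | cu
  · rcases hFv : pvFindComp comps uv.2 with _ | cv
    · -- both endpoints new
      have hu : uv.1 ∉ comps.flatten := pvFindComp_eq_none.mp hFu
      have hv : uv.2 ∉ comps.flatten := pvFindComp_eq_none.mp hFv
      have hsd1 : p.setdefault uv.1 uv.1 = p.insert uv.1 uv.1 :=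
        PySem.Dict.setdefault_of_not_contains p _ (hcontf _ hu)
      have hInv1 : UFInv (p.insert uv.1 uv.1) m (comps ++ [[uv.1]]) := pv_inv_add_new hInv hu
      by_cases huv : uv.1 = uv.2
      · have hc1 : (p.insert uv.1 uv.1).contains uv.2 = true := by
          rw [← huv, PySem.Dict.contains_insert]
          simp
        have hsd2 : (p.insert uv.1 uv.1).setdefault uv.2 uv.2 = p.insert uv.1 uv.1 :=
          PySem.Dict.setdefault_of_contains _ _ hc1
        obtain ⟨p', hU, hInv'⟩ := pvUnion_same hInv1
          (by simp : [uv.1] ∈ comps ++ [[uv.1]])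
          (List.mem_singleton.mpr rfl) (List.mem_singleton.mpr huv.symm)
        refine ⟨p', comps ++ [[uv.1]], false, m, ?_, ?_, hInv'⟩
        · simp [pvStepA, hsd1, hsd2, hU]
        · simp [pvStepB, hFv, huv]
      · have hc2 : (p.insert uv.1 uv.1).contains uv.2 = false := by
          rw [PySem.Dict.contains_insert]
          have h1 : (uv.2 == uv.1) = false := by
            simp
            exact fun h => huv h.symm
          rw [h1, Bool.false_or]
          exact hcontf _ hv
        have hsd2 : (p.insert uv.1 uv.1).setdefault uv.2 uv.2
            = (p.insert uv.1 uv.1).insert uv.2 uv.2 :=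
          PySem.Dict.setdefault_of_not_contains _ _ hc2
        have hv1 : uv.2 ∉ (comps ++ [[uv.1]]).flatten := by
          rw [List.flatten_append]
          simp only [List.flatten_cons, List.flatten_nil, List.append_nil, List.mem_append,
            List.mem_singleton]
          intro hmem
          rcases hmem with h | h
          · exact hv h
          · exact huv h.symm
        have hInv2 := pv_inv_add_new hInv1 hv1
        have hne : ([uv.1] : List Int) ≠ [uv.2] := by simp [huv]
        obtain ⟨p', m', hU, hInv'⟩ := pvUnion_diff hInv2
          (by simp : [uv.1] ∈ comps ++ [[uv.1]] ++ [[uv.2]])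
          (List.mem_singleton.mpr rfl)
          (by simp : [uv.2] ∈ comps ++ [[uv.1]] ++ [[uv.2]])
          (List.mem_singleton.mpr rfl) hne (List.Perm.refl _)
        have hfilter : ((comps ++ [[uv.1]] ++ [[uv.2]]).filter
            (fun c => c ≠ [uv.1] ∧ c ≠ [uv.2])) = comps := by
          rw [List.filter_append, List.filter_append]
          have h1 : comps.filter (fun c => c ≠ [uv.1] ∧ c ≠ [uv.2]) = comps := by
            apply List.filter_eq_self.mpr
            intro c hc
            have e1 : c ≠ [uv.1] := fun h => hu (pv_mem_flatten hc (by rw [h]; simp))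
            have e2 : c ≠ [uv.2] := fun h => hv (pv_mem_flatten hc (by rw [h]; simp))
            simp [e1, e2]
          have h2 : ([[uv.1]] : List (List Int)).filter (fun c => c ≠ [uv.1] ∧ c ≠ [uv.2]) = [] := by simp
          have h3 : ([[uv.2]] : List (List Int)).filter (fun c => c ≠ [uv.1] ∧ c ≠ [uv.2]) = [] := by simp
          rw [h1, h2, h3, List.append_nil, List.append_nil]
        rw [hfilter] at hInv'
        refine ⟨p', comps ++ [[uv.1, uv.2]], true, m', ?_, ?_, hInv'⟩
        · simp [pvStepA, hsd1, hsd2, hU]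
        · simp [pvStepB, hFu, hFv, huv]
    · -- u new, v known
      have hu : uv.1 ∉ comps.flatten := pvFindComp_eq_none.mp hFu
      obtain ⟨hcv, hvv⟩ := pvFindComp_eq_some hFv
      have hvu : uv.2 ≠ uv.1 := fun h => hu (h ▸ pv_mem_flatten hcv hvv)
      have hsd1 : p.setdefault uv.1 uv.1 = p.insert uv.1 uv.1 :=
        PySem.Dict.setdefault_of_not_contains p _ (hcontf _ hu)
      have hc2 : (p.insert uv.1 uv.1).contains uv.2 = true := by
        rw [PySem.Dict.contains_insert, hcontt _ (pv_mem_flatten hcv hvv)]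
        simp
      have hsd2 : (p.insert uv.1 uv.1).setdefault uv.2 uv.2 = p.insert uv.1 uv.1 :=
        PySem.Dict.setdefault_of_contains _ _ hc2
      have hInv1 : UFInv (p.insert uv.1 uv.1) m (comps ++ [[uv.1]]) := pv_inv_add_new hInv hu
      have hne : ([uv.1] : List Int) ≠ cv := by
        intro h
        exact hu (pv_mem_flatten hcv (by rw [← h]; simp))
      obtain ⟨p', m', hU, hInv'⟩ := pvUnion_diff hInv1
        (by simp : [uv.1] ∈ comps ++ [[uv.1]])
        (List.mem_singleton.mpr rfl)
        (List.mem_append_left _ hcv) hvv hne List.perm_append_comm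
      have hfilter : ((comps ++ [[uv.1]]).filter (fun c => c ≠ [uv.1] ∧ c ≠ cv))
          = comps.filter (fun c => c ≠ cv) := by
        rw [List.filter_append]
        have h2 : ([[uv.1]] : List (List Int)).filter (fun c => c ≠ [uv.1] ∧ c ≠ cv) = [] := by simp
        rw [h2, List.append_nil]
        apply List.filter_congr
        intro c hc
        have e1 : c ≠ [uv.1] := fun h => hu (pv_mem_flatten hc (by rw [h]; simp))
        simp [e1]
      rw [hfilter] at hInv'
      refine ⟨p', comps.filter (fun c => c ≠ cv) ++ [cv ++ [uv.1]], true, m', ?_, ?_, hInv'⟩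
      · simp [pvStepA, hsd1, hsd2, hU]
      · simp [pvStepB, hFu, hFv]
  · rcases hFv : pvFindComp comps uv.2 with _ | cv
    · -- u known, v new
      obtain ⟨hcu, huu⟩ := pvFindComp_eq_some hFu
      have hv : uv.2 ∉ comps.flatten := pvFindComp_eq_none.mp hFv
      have hsd1 : p.setdefault uv.1 uv.1 = p :=
        PySem.Dict.setdefault_of_contains _ _ (hcontt _ (pv_mem_flatten hcu huu))
      have hsd2 : p.setdefault uv.2 uv.2 = p.insert uv.2 uv.2 :=
        PySem.Dict.setdefault_of_not_contains p _ (hcontf _ hv)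
      have hInv1 : UFInv (p.insert uv.2 uv.2) m (comps ++ [[uv.2]]) := pv_inv_add_new hInv hv
      have hne : cu ≠ [uv.2] := by
        intro h
        exact hv (pv_mem_flatten hcu (by rw [h]; simp))
      obtain ⟨p', m', hU, hInv'⟩ := pvUnion_diff hInv1
        (List.mem_append_left _ hcu) huu
        (by simp : [uv.2] ∈ comps ++ [[uv.2]])
        (List.mem_singleton.mpr rfl) hne (List.Perm.refl _)
      have hfilter : ((comps ++ [[uv.2]]).filter (fun c => c ≠ cu ∧ c ≠ [uv.2]))
          = comps.filter (fun c => c ≠ cu) := by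
        rw [List.filter_append]
        have h2 : ([[uv.2]] : List (List Int)).filter (fun c => c ≠ cu ∧ c ≠ [uv.2]) = [] := by simp
        rw [h2, List.append_nil]
        apply List.filter_congr
        intro c hc
        have e1 : c ≠ [uv.2] := fun h => hv (pv_mem_flatten hc (by rw [h]; simp))
        simp [e1]
      rw [hfilter] at hInv'
      refine ⟨p', comps.filter (fun c => c ≠ cu) ++ [cu ++ [uv.2]], true, m', ?_, ?_, hInv'⟩
      · simp [pvStepA, hsd1, hsd2, hU]
      · simp [pvStepB, hFu, hFv]
    · -- both known
      obtain ⟨hcu, huu⟩ := pvFindComp_eq_some hFu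
      obtain ⟨hcv, hvv⟩ := pvFindComp_eq_some hFv
      have hsd1 : p.setdefault uv.1 uv.1 = p :=
        PySem.Dict.setdefault_of_contains _ _ (hcontt _ (pv_mem_flatten hcu huu))
      have hsd2 : p.setdefault uv.2 uv.2 = p :=
        PySem.Dict.setdefault_of_contains _ _ (hcontt _ (pv_mem_flatten hcv hvv))
      by_cases hcc : cu = cv
      · obtain ⟨p', hU, hInv'⟩ := pvUnion_same hInv hcu huu (hcc ▸ hvv)
        refine ⟨p', comps, false, m, ?_, ?_, hInv'⟩
        · simp [pvStepA, hsd1, hsd2, hU]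
        · simp [pvStepB, hFu, hFv, hcc]
      · obtain ⟨p', m', hU, hInv'⟩ := pvUnion_diff hInv hcu huu hcv hvv hcc (List.Perm.refl _)
        refine ⟨p', comps.filter (fun c => c ≠ cu ∧ c ≠ cv) ++ [cu ++ cv], true, m', ?_, ?_, hInv'⟩
        · simp [pvStepA, hsd1, hsd2, hU]
        · simp [pvStepB, hFu, hFv, hcc]
theorem pv_inv_empty : UFInv PySem.Dict.empty (fun _ => 0) [] := by
  refine { flat_nodup := List.nodup_nil, nonempty := ?_, keys_iff := ?_, closed := ?_,
           measure := ?_, root_uniq := ?_, keys_nodup := ?_ }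
  · intro c hc; cases hc
  · intro z
    rw [PySem.Dict.contains_empty]
    simp
  · intro c hc; cases hc
  · intro z hz; cases hz
  · intro c hc; cases hc
  · rw [PySem.Dict.keys_empty]; exact List.nodup_nil

theorem pv_fold : ∀ (edges : List (Int × Int)) (p : PySem.Dict Int Int)
    (comps : List (List Int)) (rankN nullN : Int) (m : Int → Nat), UFInv p m comps →
    (edges.foldl pvStepA (p, rankN)).2 + (edges.foldl pvStepB (comps, nullN)).2
      = rankN + nullN + edges.length := by
  intro edges
  induction edges with
  | nil =>
    intro p comps rankN nullN m _
    simp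
  | cons uv rest ih =>
    intro p comps rankN nullN m hInv
    obtain ⟨p', comps', d, m', hA, hB, hInv'⟩ := pv_step hInv uv rankN nullN
    rw [List.foldl_cons, List.foldl_cons, hA, hB]
    have := ih p' comps' (if d then rankN + 1 else rankN) (if d then nullN else nullN + 1) m' hInv'
    rw [this]
    cases d <;> simp <;> omega

-- ===== VERDICT (by name: the statement is the Claim_ definition above) =====
theorem edge_set_nullity_py_spec : Claim_equal_edge_set_nullity_py := by
  unfold Claim_equal_edge_set_nullity_py Spec_edge_set_nullity_py
  intro edges _
  unfold edge_set_nullity_py edge_set_nullity_py_alt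
  by_cases h : edges = []
  · subst h
    simp
  · rw [if_neg h]
    have := pv_fold edges PySem.Dict.empty [] 0 0 (fun _ => 0) pv_inv_empty
    omega
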